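-- pv_equiv track=rewrite | github.com/mlevesquedion/misc-algorithms | fill_shape.py | fill_shape
-- ===== SOURCE A (Python) =====
-- from itertools import groupby
--
-- def fill_shape(points):
--     # assumes shape is closed, fills by row
--     fill_points = []
--     for (row, group) in groupby(sorted(points), key=lambda x: x[0]):
--         group = list(group)
--         for ((_, col), (_, nextcol)) in zip(group, group[1:]):
--             for missing_col in range(col + 1, nextcol):
--                 fill_points.append((row, missing_col))
--     return points + fill_points
-- ===== SOURCE B (Python) =====
-- def fill_shape(points):
--     # fills by row: for each row, scan its full column span and add the missing columns
--     fill_points = []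
--     for row in sorted({r for (r, _) in points}):
--         cols = {c for (r, c) in points if r == row}
--         for c in range(min(cols), max(cols) + 1):
--             if c not in cols:
--                 fill_points.append((row, c))
--     return points + fill_points
-- ===== Notes on version B (the rewrite author's own statement) =====
-- stated objective: alternative
-- what changed: Replaces sort + itertools.groupby + consecutive-pair gap loops by a per-row span scan: iterate the sorted distinct rows, collect each row's column set, and scan range(min, max+1) keeping the columns absent from the set.
import Mathlib
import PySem

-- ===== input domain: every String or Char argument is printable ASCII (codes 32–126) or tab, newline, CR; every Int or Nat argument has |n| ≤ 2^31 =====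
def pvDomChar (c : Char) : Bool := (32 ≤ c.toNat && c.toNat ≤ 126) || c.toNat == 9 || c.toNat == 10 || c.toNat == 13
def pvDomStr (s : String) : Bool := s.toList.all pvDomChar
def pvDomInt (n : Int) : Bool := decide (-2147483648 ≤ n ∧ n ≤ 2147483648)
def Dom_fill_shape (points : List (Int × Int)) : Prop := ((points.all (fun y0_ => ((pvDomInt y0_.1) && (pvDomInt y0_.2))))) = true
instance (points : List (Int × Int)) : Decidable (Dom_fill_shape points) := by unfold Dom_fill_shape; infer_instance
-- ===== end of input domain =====

-- B replaces A's sort + groupby + consecutive-pair gap loops by a per-row span scan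
-- (sorted distinct rows; for each row scan min..max and keep the absent columns): alternative decomposition, same results.

-- ===== PORT A =====
-- itertools.groupby over a list keyed by the first component: consecutive runs of equal keys
def pvGroupByRow : List (Int × Int) → List (Int × List (Int × Int))
  | [] => []
  | x :: xs =>
      (x.1, x :: xs.takeWhile (fun p => p.1 == x.1)) :: pvGroupByRow (xs.dropWhile (fun p => p.1 == x.1))
  termination_by l => l.length
  decreasing_by simpa using Nat.lt_succ_of_le (List.length_dropWhile_le _ _)

def fill_shape (points : List (Int × Int)) : List (Int × Int) :=
  -- sorted(points): tuples compare lexicographically → sorted2 on (fst, snd)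
  let sortedPoints := PySem.List.sorted2 points (fun x => x.1) (fun x => x.2) false
  let fill_points :=
    (pvGroupByRow sortedPoints).foldl (fun acc rg =>
      ((rg.2).zip (PySem.List.slice rg.2 (some 1) none)).foldl (fun acc2 pq =>
        (PySem.List.pyRange (pq.1.2 + 1) pq.2.2).foldl (fun acc3 m => acc3 ++ [(rg.1, m)]) acc2) acc) []
  points ++ fill_points

-- ===== PORT B =====
def fill_shape_alt (points : List (Int × Int)) : List (Int × Int) :=
  let fill_points :=
    (PySem.List.sorted (PySem.Set.ofList (points.map (fun p => p.1))) (fun r => r) false).foldl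
      (fun acc row =>
        let cols : PySem.Set Int :=
          PySem.Set.ofList ((points.filter (fun p => p.1 == row)).map (fun p => p.2))
        match PySem.List.min? cols (fun c => c), PySem.List.max? cols (fun c => c) with
        | some lo, some hi =>
            (PySem.List.pyRange lo (hi + 1)).foldl
              (fun acc2 c => if PySem.Set.contains cols c then acc2 else acc2 ++ [(row, c)]) acc
        | _, _ => acc) []
  points ++ fill_points

-- ===== PRECONDITION & SPEC =====
def Spec_fill_shape (points : List (Int × Int)) (out : List (Int × Int)) : Prop := out = fill_shape_alt points
instance (points : List (Int × Int)) (out : List (Int × Int)) : Decidable (Spec_fill_shape points out) := by unfold Spec_fill_shape; infer_instance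

-- ===== CLAIM (what is proved, stated in full; the proofs are below) =====
def Claim_equal_fill_shape : Prop := ∀ (points : List (Int × Int)), Dom_fill_shape points → Spec_fill_shape points (fill_shape points)

-- ===== LEMMAS AND PROOFS =====

-- Python's tuple comparison used by sorted2 on (fst, snd)
def pvBef (a b : Int × Int) : Bool :=
  decide (a.1 < b.1) || (!decide (b.1 < a.1) && decide (a.2 < b.2))

theorem pvBef_asym (a b : Int × Int) (h : pvBef a b = true) : pvBef b a = false := by
  simp [pvBef] at *; omega

theorem pvBef_trans (a b c : Int × Int) (h1 : pvBef a b = true) (h2 : pvBef b c = true) :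
    pvBef a c = true := by
  simp [pvBef] at *; omega

theorem pv_insertBy_pairwise {α : Type} (before : α → α → Bool)
    (asym : ∀ a b, before a b = true → before b a = false)
    (htrans : ∀ a b c, before a b = true → before b c = true → before a c = true)
    (x : α) (l : List α) (h : l.Pairwise (fun a b => before b a = false)) :
    (PySem.List.insertBy before x l).Pairwise (fun a b => before b a = false) := by
  induction l with
  | nil => simp [PySem.List.insertBy]
  | cons y ys ih =>
    rw [List.pairwise_cons] at h
    by_cases hxy : before x y = true
    · simp only [PySem.List.insertBy, hxy, if_true]
      refine List.Pairwise.cons ?_ (List.Pairwise.cons h.1 h.2)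
      intro w hw
      rcases List.mem_cons.mp hw with rfl | hw'
      · exact asym _ _ hxy
      · by_cases hwx : before w x = true
        · have := h.1 w hw'
          exact absurd (htrans _ _ _ hwx hxy) (by simp [this])
        · simpa using hwx
    · simp only [PySem.List.insertBy, hxy]
      refine List.Pairwise.cons ?_ (ih h.2)
      intro w hw
      rcases (PySem.List.mem_insertBy before x w ys).mp hw with rfl | hw'
      · simpa using hxy
      · exact h.1 w hw'

theorem pv_foldl_insertBy_pairwise {α : Type} (before : α → α → Bool)
    (asym : ∀ a b, before a b = true → before b a = false)
    (htrans : ∀ a b c, before a b = true → before b c = true → before a c = true)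
    (l acc : List α) (hacc : acc.Pairwise (fun a b => before b a = false)) :
    (l.foldl (fun acc x => PySem.List.insertBy before x acc) acc).Pairwise
      (fun a b => before b a = false) := by
  induction l generalizing acc with
  | nil => simpa using hacc
  | cons x xs ih =>
    simpa using ih _ (pv_insertBy_pairwise before asym htrans x acc hacc)

theorem pv_sorted2_pairwise (points : List (Int × Int)) :
    (PySem.List.sorted2 points (fun x => x.1) (fun x => x.2) false).Pairwise
      (fun a b => pvBef b a = false) := by
  have : PySem.List.sorted2 points (fun x => x.1) (fun x => x.2) false
      = points.foldl (fun acc x => PySem.List.insertBy pvBef x acc) [] := rfl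
  rw [this]
  exact pv_foldl_insertBy_pairwise pvBef pvBef_asym pvBef_trans points [] (by simp)

-- gap list between consecutive entries of a column list
def pvGapsL : List Int → List Int
  | a :: b :: t => PySem.List.pyRange (a + 1) b ++ pvGapsL (b :: t)
  | _ => []

theorem pv_head_le (l : List Int) (hs : l.Pairwise (fun a b => a ≤ b)) (hne : l ≠ [])
    (x : Int) (hx : x ∈ l) : l.head hne ≤ x := by
  cases l with
  | nil => exact absurd rfl hne
  | cons a t =>
    rcases List.mem_cons.mp hx with h | hx'
    · simp [h]
    · exact (List.pairwise_cons.mp hs).1 x hx'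

theorem pv_le_getLast (l : List Int) (hs : l.Pairwise (fun a b => a ≤ b)) (hne : l ≠ [])
    (x : Int) (hx : x ∈ l) : x ≤ l.getLast hne := by
  induction l with
  | nil => exact absurd rfl hne
  | cons a t ih =>
    cases t with
    | nil =>
      have hxa : x = a := by simpa using hx
      simp [hxa]
    | cons b t' =>
      rw [List.getLast_cons (by simp)]
      rcases List.mem_cons.mp hx with rfl | hx'
      · exact le_trans ((List.pairwise_cons.mp hs).1 _ (List.getLast_mem _))
          (le_refl _)
      · exact ih (List.pairwise_cons.mp hs).2 (by simp) hx'

-- the core per-row fact: pair gaps of a sorted column list = span scan keeping absent columns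
theorem pv_gapsL_eq (l : List Int) (hne : l ≠ []) (hs : l.Pairwise (fun a b => a ≤ b)) :
    pvGapsL l = (PySem.List.pyRange (l.head hne) (l.getLast hne + 1)).filter
      (fun c => decide (c ∉ l)) := by
  induction l with
  | nil => exact absurd rfl hne
  | cons a t ih =>
    cases t with
    | nil =>
      simp [pvGapsL, PySem.List.pyRange_one_cons (show (a:Int) < a + 1 by omega),
        PySem.List.pyRange_one_eq_nil (le_refl (a + 1))]
    | cons b t' =>
      have hpair := List.pairwise_cons.mp hs
      have hab : a ≤ b := hpair.1 b (by simp)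
      have hblast : b ≤ (b :: t').getLast (by simp) :=
        pv_le_getLast _ hpair.2 (by simp) b (by simp)
      have hlast : (a :: b :: t').getLast hne = (b :: t').getLast (by simp) :=
        List.getLast_cons (by simp)
      have hhead : (a :: b :: t').head hne = a := rfl
      rw [hhead, hlast]
      rw [PySem.List.pyRange_one_append a b ((b :: t').getLast (by simp) + 1) hab (by omega)]
      rw [List.filter_append]
      have h1 : (PySem.List.pyRange a b).filter (fun c => decide (c ∉ a :: b :: t'))
          = PySem.List.pyRange (a + 1) b := by
        by_cases hab' : a < b
        · rw [PySem.List.pyRange_one_cons hab']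
          rw [List.filter_cons]
          simp only [show (decide (a ∉ a :: b :: t')) = false by simp]
          rw [if_neg (by simp)]
          apply List.filter_eq_self.mpr
          intro c hc
          have hc' := PySem.List.mem_pyRange_one.mp hc
          simp only [decide_eq_true_eq]
          intro hmem
          rcases List.mem_cons.mp hmem with rfl | hmem'
          · omega
          · have : b ≤ c := pv_head_le _ hpair.2 (by simp) c hmem'
            omega
        · have hba : b ≤ a := by omega
          rw [PySem.List.pyRange_one_eq_nil hba, PySem.List.pyRange_one_eq_nil (by omega)]
          simp
      have h2 : (PySem.List.pyRange b ((b :: t').getLast (by simp) + 1)).filter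
            (fun c => decide (c ∉ a :: b :: t'))
          = (PySem.List.pyRange b ((b :: t').getLast (by simp) + 1)).filter
            (fun c => decide (c ∉ b :: t')) := by
        apply List.filter_congr
        intro c hc
        have hc' := PySem.List.mem_pyRange_one.mp hc
        simp only [decide_eq_decide, List.mem_cons]
        constructor
        · intro h hmem; exact h (Or.inr hmem)
        · intro h hmem
          rcases hmem with rfl | hmem'
          · exact h (Or.inl (by omega))
          · exact h hmem'
      have ih' := ih (by simp) hpair.2
      simp only [List.head_cons] at ih'
      rw [h1, h2, ← ih']
      rfl

-- extrema of any list with the same members as a sorted nonempty list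
theorem pv_min?_eq (xs l : List Int) (hmem : ∀ c, c ∈ xs ↔ c ∈ l) (hne : l ≠ [])
    (hs : l.Pairwise (fun a b => a ≤ b)) :
    PySem.List.min? xs (fun c => c) = some (l.head hne) := by
  have hxne : xs ≠ [] := by
    intro h; subst h
    exact (by simpa using (hmem (l.head hne)).mpr (List.head_mem hne))
  rcases hm : PySem.List.min? xs (fun c => c) with _ | m
  · exact absurd ((PySem.List.min?_eq_none_iff xs _).mp hm) hxne
  · have h1 : m ∈ l := (hmem m).mp (PySem.List.min?_mem hm)
    have h2 : m ≤ l.head hne := PySem.List.min?_isMin hm _ ((hmem _).mpr (List.head_mem hne))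
    have h3 : l.head hne ≤ m := pv_head_le l hs hne m h1
    have : m = l.head hne := le_antisymm h2 h3
    rw [this]

theorem pv_max?_eq (xs l : List Int) (hmem : ∀ c, c ∈ xs ↔ c ∈ l) (hne : l ≠ [])
    (hs : l.Pairwise (fun a b => a ≤ b)) :
    PySem.List.max? xs (fun c => c) = some (l.getLast hne) := by
  have hxne : xs ≠ [] := by
    intro h; subst h
    exact (by simpa using (hmem (l.head hne)).mpr (List.head_mem hne))
  rcases hm : PySem.List.max? xs (fun c => c) with _ | m
  · exact absurd ((PySem.List.max?_eq_none_iff xs _).mp hm) hxne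
  · have h1 : m ∈ l := (hmem m).mp (PySem.List.max?_mem hm)
    have h2 : l.getLast hne ≤ m := PySem.List.max?_isMax hm _ ((hmem _).mpr (List.getLast_mem hne))
    have h3 : m ≤ l.getLast hne := pv_le_getLast l hs hne m h1
    have : m = l.getLast hne := le_antisymm h3 h2
    rw [this]

-- keys of the groupby, in order
def pvRowsOf : List (Int × Int) → List Int
  | [] => []
  | x :: xs => x.1 :: pvRowsOf (xs.dropWhile (fun p => p.1 == x.1))
  termination_by l => l.length
  decreasing_by simpa using Nat.lt_succ_of_le (List.length_dropWhile_le _ _)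

theorem pv_dropWhile_gt (x1 : Int) (l : List (Int × Int))
    (hs : l.Pairwise (fun a b => a.1 ≤ b.1)) (hge : ∀ p ∈ l, x1 ≤ p.1) :
    ∀ p ∈ l.dropWhile (fun p => p.1 == x1), x1 < p.1 := by
  induction l with
  | nil => simp
  | cons y t ih =>
    by_cases hy : (y.1 == x1) = true
    · rw [List.dropWhile_cons, if_pos hy]
      exact ih (List.pairwise_cons.mp hs).2 (fun p hp => hge p (List.mem_cons_of_mem _ hp))
    · rw [List.dropWhile_cons, if_neg hy]
      intro p hp
      rcases List.mem_cons.mp hp with rfl | hp'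
      · have := hge p (by simp)
        have : p.1 ≠ x1 := by simpa using hy
        omega
      · have h1 : y.1 ≤ p.1 := (List.pairwise_cons.mp hs).1 p hp'
        have h2 : x1 ≤ y.1 := hge y (by simp)
        have h3 : y.1 ≠ x1 := by simpa using hy
        omega

theorem pv_mem_rowsOf (s : List (Int × Int)) (hs : s.Pairwise (fun a b => a.1 ≤ b.1)) (r : Int) :
    r ∈ pvRowsOf s ↔ r ∈ s.map (fun p => p.1) := by
  induction s using pvRowsOf.induct with
  | case1 => simp [pvRowsOf]
  | case2 x xs ih =>
    rw [pvRowsOf]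
    have hpair := List.pairwise_cons.mp hs
    have hrest : (xs.dropWhile (fun p => p.1 == x.1)).Pairwise (fun a b => a.1 ≤ b.1) :=
      hpair.2.sublist (List.dropWhile_sublist _)
    rw [List.mem_cons, ih hrest]
    have hsplit : xs = xs.takeWhile (fun p => p.1 == x.1) ++ xs.dropWhile (fun p => p.1 == x.1) :=
      (List.takeWhile_append_dropWhile ..).symm
    constructor
    · intro h
      rcases h with rfl | h'
      · simp
      · rcases List.mem_map.mp h' with ⟨p, hp, rfl⟩
        exact List.mem_map.mpr ⟨p, List.mem_cons_of_mem _
          (by rw [hsplit]; exact List.mem_append_right _ hp), rfl⟩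
    · intro h
      rcases List.mem_map.mp h with ⟨p, hp, rfl⟩
      rcases List.mem_cons.mp hp with rfl | hp'
      · exact Or.inl rfl
      · rw [hsplit] at hp'
        rcases List.mem_append.mp hp' with htk | hdr
        · have h2 : (p.1 == x.1) = true := List.mem_takeWhile_imp (p := fun q : Int × Int => q.1 == x.1) htk
          have h3 : p.1 = x.1 := by simpa using h2
          exact Or.inl h3
        · exact Or.inr (List.mem_map.mpr ⟨p, hdr, rfl⟩)

theorem pv_rowsOf_pairwise (s : List (Int × Int)) (hs : s.Pairwise (fun a b => a.1 ≤ b.1)) :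
    (pvRowsOf s).Pairwise (fun a b => a < b) := by
  induction s using pvRowsOf.induct with
  | case1 => simp [pvRowsOf]
  | case2 x xs ih =>
    rw [pvRowsOf]
    have hpair := List.pairwise_cons.mp hs
    have hrest : (xs.dropWhile (fun p => p.1 == x.1)).Pairwise (fun a b => a.1 ≤ b.1) :=
      hpair.2.sublist (List.dropWhile_sublist _)
    refine List.Pairwise.cons ?_ (ih hrest)
    intro r hr
    rcases List.mem_map.mp ((pv_mem_rowsOf _ hrest r).mp hr) with ⟨p, hp, rfl⟩
    exact pv_dropWhile_gt x.1 xs hpair.2 hpair.1 p hp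

theorem pv_groupByRow_eq (s : List (Int × Int)) (hs : s.Pairwise (fun a b => a.1 ≤ b.1)) :
    pvGroupByRow s = (pvRowsOf s).map (fun r => (r, s.filter (fun p => p.1 == r))) := by
  induction s using pvRowsOf.induct with
  | case1 => simp [pvGroupByRow, pvRowsOf]
  | case2 x xs ih =>
    rw [pvGroupByRow, pvRowsOf]
    have hpair := List.pairwise_cons.mp hs
    have hrest : (xs.dropWhile (fun p => p.1 == x.1)).Pairwise (fun a b => a.1 ≤ b.1) :=
      hpair.2.sublist (List.dropWhile_sublist _)
    have hgt := pv_dropWhile_gt x.1 xs hpair.2 hpair.1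
    have hsplit : xs = xs.takeWhile (fun p => p.1 == x.1) ++ xs.dropWhile (fun p => p.1 == x.1) :=
      (List.takeWhile_append_dropWhile ..).symm
    rw [List.map_cons]
    congr 1
    · -- head group: filter over s at key x.1 is x :: takeWhile
      have hfx : (x :: xs).filter (fun p => p.1 == x.1)
          = x :: xs.takeWhile (fun p => p.1 == x.1) := by
        rw [List.filter_cons_of_pos (by simp)]
        congr 1
        conv_lhs => rw [hsplit]
        rw [List.filter_append]
        have e1 : (xs.takeWhile (fun p => p.1 == x.1)).filter (fun p => p.1 == x.1)
            = xs.takeWhile (fun p => p.1 == x.1) :=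
          List.filter_eq_self.mpr (fun p hp => List.mem_takeWhile_imp (p := fun q : Int × Int => q.1 == x.1) hp)
        have e2 : (xs.dropWhile (fun p => p.1 == x.1)).filter (fun p => p.1 == x.1) = [] :=
          List.filter_eq_nil_iff.mpr (fun p hp => by
            have h4 := hgt p hp
            simp only [beq_iff_eq]
            omega)
        rw [e1, e2]
        simp
      rw [hfx]
    · rw [ih hrest]
      apply List.map_congr_left
      intro r hr
      have hrgt : x.1 < r := by
        rcases List.mem_map.mp ((pv_mem_rowsOf _ hrest r).mp hr) with ⟨p, hp, rfl⟩
        exact hgt p hp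
      congr 1
      -- filter over s at key r > x.1 passes only through the dropped suffix
      rw [List.filter_cons_of_neg (by simp only [beq_iff_eq]; omega)]
      have e3 : (xs.takeWhile (fun p => p.1 == x.1)).filter (fun p => p.1 == r) = [] :=
        List.filter_eq_nil_iff.mpr (fun p hp => by
          have h5 : (p.1 == x.1) = true := List.mem_takeWhile_imp (p := fun q : Int × Int => q.1 == x.1) hp
          simp only [beq_iff_eq] at h5 ⊢
          omega)
      have e4 : xs.filter (fun p => p.1 == r)
          = (xs.dropWhile (fun p => p.1 == x.1)).filter (fun p => p.1 == r) := by
        conv_lhs => rw [hsplit]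
        rw [List.filter_append, e3]
        simp
      rw [e4]

-- ===== VERDICT (by name: the statement is the Claim_ definition above) =====
theorem fill_shape_spec : Claim_equal_fill_shape := by
  intro points _
  unfold Spec_fill_shape fill_shape fill_shape_alt
  dsimp only
  set s := PySem.List.sorted2 points (fun x => x.1) (fun x => x.2) false with hsdef
  have hperm : s.Perm points := PySem.List.sorted2_perm points _ _ false
  have hlex := pv_sorted2_pairwise points
  rw [← hsdef] at hlex
  have hfst : s.Pairwise (fun a b => a.1 ≤ b.1) := by
    refine hlex.imp ?_; intro a b h; simp [pvBef] at h; omega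
  congr 1
  -- rows of B = pvRowsOf s
  have hrows : PySem.List.sorted (PySem.Set.ofList (points.map (fun p => p.1))) (fun r => r) false
      = pvRowsOf s := by
    apply PySem.List.sorted_eq_of_perm_of_pairwise_lt
    · apply (List.perm_ext_iff_of_nodup ?_ ?_).mpr
      · intro r
        rw [pv_mem_rowsOf s hfst, PySem.Set.mem_ofList]
        constructor
        · intro h; rcases List.mem_map.mp h with ⟨p, hp, rfl⟩
          exact List.mem_map.mpr ⟨p, hperm.mem_iff.mp hp, rfl⟩
        · intro h; rcases List.mem_map.mp h with ⟨p, hp, rfl⟩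
          exact List.mem_map.mpr ⟨p, hperm.mem_iff.mpr hp, rfl⟩
      · exact (pv_rowsOf_pairwise s hfst).imp (fun h => ne_of_lt h)
      · exact PySem.Set.nodup_ofList _
    · exact pv_rowsOf_pairwise s hfst
  rw [hrows, pv_groupByRow_eq s hfst, List.foldl_map]
  apply PySem.List.foldl_congr_mem
  intro acc r hr
  -- per-row data
  set g := s.filter (fun p => p.1 == r) with hgdef
  have hgne : g ≠ [] := by
    rcases List.mem_map.mp ((pv_mem_rowsOf s hfst r).mp hr) with ⟨p, hp, rfl⟩
    intro h
    have : p ∈ g := List.mem_filter.mpr ⟨hp, by simp⟩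
    rw [h] at this; simp at this
  set cA := g.map (fun p => p.2) with hcAdef
  have hcAne : cA ≠ [] := by
    intro h; exact hgne (by simpa [hcAdef] using h)
  have hcAsorted : cA.Pairwise (fun a b => a ≤ b) := by
    rw [hcAdef]
    apply List.pairwise_map.mpr
    refine (hlex.filter _).imp_of_mem ?_
    intro a b ha hb h
    have ha' : a.1 = r := by simpa using (List.mem_filter.mp ha).2
    have hb' : b.1 = r := by simpa using (List.mem_filter.mp hb).2
    simp [pvBef] at h
    omega
  set xsB := (points.filter (fun p => p.1 == r)).map (fun p => p.2) with hxsBdef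
  have hmemB : ∀ c, c ∈ (PySem.Set.ofList xsB : List Int) ↔ c ∈ cA := by
    intro c
    rw [PySem.Set.mem_ofList]
    simp only [hxsBdef, hcAdef, hgdef, List.mem_map, List.mem_filter]
    constructor
    · rintro ⟨p, ⟨hp, hp1⟩, rfl⟩; exact ⟨p, ⟨hperm.mem_iff.mpr hp, hp1⟩, rfl⟩
    · rintro ⟨p, ⟨hp, hp1⟩, rfl⟩; exact ⟨p, ⟨hperm.mem_iff.mp hp, hp1⟩, rfl⟩
  -- A's body for this row
  have hslice : PySem.List.slice g (some 1) none = g.drop 1 :=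
    PySem.List.slice_from g (by omega)
  have hAbody : (g.zip (PySem.List.slice g (some 1) none)).foldl (fun acc2 pq =>
        (PySem.List.pyRange (pq.1.2 + 1) pq.2.2).foldl (fun acc3 m => acc3 ++ [(r, m)]) acc2) acc
      = acc ++ (pvGapsL cA).map (fun m => (r, m)) := by
    rw [hslice]
    have : ∀ (gg : List (Int × Int)) (acc : List (Int × Int)),
        (gg.zip (gg.drop 1)).foldl (fun acc2 pq =>
          (PySem.List.pyRange (pq.1.2 + 1) pq.2.2).foldl (fun acc3 m => acc3 ++ [(r, m)]) acc2) acc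
        = acc ++ (pvGapsL (gg.map (fun p => p.2))).map (fun m => (r, m)) := by
      intro gg
      induction gg with
      | nil => simp [pvGapsL]
      | cons p t iht =>
        intro acc
        cases t with
        | nil => simp [pvGapsL]
        | cons q t' =>
          simp only [List.drop_one, List.tail_cons, List.zip_cons_cons, List.foldl_cons]
          rw [PySem.List.foldl_append_singleton_eq_map (fun m => (r, m))]
          have := iht (acc ++ (PySem.List.pyRange (p.2 + 1) q.2).map (fun m => (r, m)))
          simp only [List.drop_one, List.tail_cons] at this
          rw [this]
          have hg : pvGapsL (p.2 :: q.2 :: List.map (fun p => p.2) t')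
              = PySem.List.pyRange (p.2 + 1) q.2 ++ pvGapsL (q.2 :: List.map (fun p => p.2) t') := rfl
          simp [hg]
    exact this g acc
  rw [hAbody]
  -- B's body for this row
  rw [pv_min?_eq (PySem.Set.ofList xsB) cA hmemB hcAne hcAsorted,
    pv_max?_eq (PySem.Set.ofList xsB) cA hmemB hcAne hcAsorted]
  dsimp only
  have hBloop : (PySem.List.pyRange (cA.head hcAne) (cA.getLast hcAne + 1)).foldl
        (fun acc2 c => if PySem.Set.contains (PySem.Set.ofList xsB) c then acc2
          else acc2 ++ [(r, c)]) acc
      = acc ++ ((PySem.List.pyRange (cA.head hcAne) (cA.getLast hcAne + 1)).filter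
          (fun c => !(PySem.Set.contains (PySem.Set.ofList xsB) c))).map (fun c => (r, c)) := by
    rw [← PySem.List.foldl_append_if (fun c => !(PySem.Set.contains (PySem.Set.ofList xsB) c))
      (fun c => (r, c))]
    apply PySem.List.foldl_congr_mem
    intro acc2 c _
    cases PySem.Set.contains (PySem.Set.ofList xsB) c
    · simp
    · simp
  rw [hBloop]
  congr 1
  rw [pv_gapsL_eq cA hcAne hcAsorted]
  congr 1
  apply List.filter_congr
  intro c _
  have := hmemB c
  by_cases hc : c ∈ cA
  · simp [this, hc]
  · simp [this, hc]
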